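-- pv_equiv track=rewrite | github.com/Leela-Nayan/Leela-Nayan-Leela-Nayan | Tasks/Set 1/Programming/Python/chall-1.py | retrieve_items
-- ===== SOURCE A (Python) =====
-- def retrieve_items(N, states):
--     count = 0
--
--     for i in range(N):
--         if states[i] == 1:
--             count += 1
--
--             for j in range(N):
--                 if states[j] == 0:
--                     states[j] = 1
--                 else:
--                     states[j] = 0
--
--     return count
-- ===== SOURCE B (Python) =====
-- def retrieve_items(N, states):
--     # Nothing happens until the first element equal to 1, so scan for it first.
--     # Each flip sends 0 -> 1 and anything else -> 0, so once at least one flip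
--     # has happened, an element with original value v currently reads 1 exactly
--     # when (v == 0) coincides with the number of flips so far being odd.
--     # Single pass, no rewriting of the list (A mutates states in place).
--     i = 0
--     while i < N and states[i] != 1:
--         i += 1
--     if i >= N:
--         return 0
--     count = 1
--     for v in states[i + 1:N]:
--         if (v == 0) if count % 2 == 1 else (v != 0):
--             count += 1
--     return count
-- ===== Notes on version B (the rewrite author's own statement) =====
-- stated objective: alternative
-- what changed: B replaces A's rescan-and-rewrite strategy (a full in-place flip of the array after every hit) by a scan for the first 1 followed by a single pass that tracks the flip parity in the running count, never rewriting the list; Pre_ excludes N greater than the list length, where A raises IndexError.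
import Mathlib
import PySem

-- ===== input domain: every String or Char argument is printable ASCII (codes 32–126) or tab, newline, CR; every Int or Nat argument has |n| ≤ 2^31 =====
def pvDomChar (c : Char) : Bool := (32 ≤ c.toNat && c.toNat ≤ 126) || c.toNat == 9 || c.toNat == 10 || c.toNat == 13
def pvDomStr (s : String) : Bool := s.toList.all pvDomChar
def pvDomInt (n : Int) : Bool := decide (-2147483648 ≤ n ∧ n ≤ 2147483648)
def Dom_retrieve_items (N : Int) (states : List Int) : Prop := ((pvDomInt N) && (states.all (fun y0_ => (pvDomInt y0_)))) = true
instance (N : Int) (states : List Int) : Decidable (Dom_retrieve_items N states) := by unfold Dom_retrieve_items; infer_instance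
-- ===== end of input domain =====

-- B drops A's inner full-array flip loop: it scans for the first 1, then counts in a
-- single pass tracking the flip parity in the running count, never rewriting the list.
-- NOTE: A mutates `states` in place; B does not. The equivalence proved here is
-- about the RETURN value only.

-- ===== PORT A =====
-- inner loop: `for j in range(N): states[j] = 1 if states[j]==0 else 0`
def retrieve_items_flipAll (N : Int) (st : List Int) : List Int :=
  (PySem.List.pyRange 0 N 1).foldl
    (fun s j =>
      if PySem.List.pyGetD s j 0 == 0 then PySem.List.pySetD s j 1
      else PySem.List.pySetD s j 0) st

def retrieve_items (N : Int) (states : List Int) : Int :=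
  ((PySem.List.pyRange 0 N 1).foldl
    (fun (p : Int × List Int) i =>
      if PySem.List.pyGetD p.2 i 0 == 1 then (p.1 + 1, retrieve_items_flipAll N p.2)
      else p)
    (0, states)).1

-- ===== PORT B =====
-- `while i < N and states[i] != 1: i += 1`  (returns the final i)
def retrieve_items_find (states : List Int) (N i : Int) : Int :=
  if _h : i < N then
    if PySem.List.pyGetD states i 0 == 1 then i
    else retrieve_items_find states N (i + 1)
  else i
termination_by (N - i).toNat
decreasing_by omega

def retrieve_items_alt (N : Int) (states : List Int) : Int :=
  let i := retrieve_items_find states N 0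
  if N ≤ i then 0
  else
    (PySem.List.slice states (some (i + 1)) (some N)).foldl
      (fun count v =>
        if (if PySem.Int.mod count 2 == 1 then v == 0 else !(v == 0)) then count + 1
        else count) 1

-- ===== PRECONDITION & SPEC =====
-- Pre_ excludes exactly the inputs where A raises IndexError: N larger than the list length.
def Pre_retrieve_items (N : Int) (states : List Int) : Prop := N ≤ (states.length : Int)
instance (N : Int) (states : List Int) : Decidable (Pre_retrieve_items N states) := by unfold Pre_retrieve_items; infer_instance
def pvWitness_retrieve_items : Int × List Int := (3, [1, 0, 2])

def Spec_retrieve_items (N : Int) (states : List Int) (out : Int) : Prop := out = retrieve_items_alt N states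
instance (N : Int) (states : List Int) (out : Int) : Decidable (Spec_retrieve_items N states out) := by unfold Spec_retrieve_items; infer_instance

-- ===== CLAIM (what is proved, stated in full; the proofs are below) =====
def Claim_equal_retrieve_items : Prop := ∀ (N : Int) (states : List Int), Dom_retrieve_items N states → Pre_retrieve_items N states → Spec_retrieve_items N states (retrieve_items N states)

-- ===== LEMMAS AND PROOFS =====

-- value after one flip (A's inner-loop write)
def pvFlip (v : Int) : Int := if v = 0 then 1 else 0
-- value after c flips
def pvFlipPow : Nat → Int → Int
  | 0, v => v
  | c + 1, v => pvFlip (pvFlipPow c v)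

-- the list A holds after c flips: the first N entries flipped c times
def pvTf (N : Int) (c : Nat) (orig : List Int) : List Int :=
  orig.mapIdx (fun k v => if (k : Int) < N then pvFlipPow c v else v)

lemma pvFlip_flip_flip (v : Int) : pvFlip (pvFlip (pvFlip v)) = pvFlip v := by
  unfold pvFlip; split_ifs <;> simp_all

lemma pvFlipPow_succ_eq (c : Nat) (v : Int) :
    pvFlipPow (c + 1) v = if c % 2 = 0 then pvFlip v else pvFlip (pvFlip v) := by
  induction c with
  | zero => simp [pvFlipPow]
  | succ d ih =>
      show pvFlip (pvFlipPow (d + 1) v) = _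
      rw [ih]
      rcases Nat.even_or_odd d with h | h
      · have h0 : d % 2 = 0 := Nat.even_iff.mp h
        have h1 : (d + 1) % 2 = 1 := by omega
        simp [h0, h1]
      · have h0 : d % 2 = 1 := Nat.odd_iff.mp h
        have h1 : (d + 1) % 2 = 0 := by omega
        simp [h0, h1, pvFlip_flip_flip]

-- "current value is 1" expressed by the parity test on the original value
lemma pvHot_eq (c : Nat) (v : Int) :
    (pvFlipPow c v == 1) =
      (if ((c : Int)) == 0 then v == 1
       else if PySem.Int.mod (c : Int) 2 == 1 then v == 0
       else !(v == 0)) := by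
  cases c with
  | zero => simp [pvFlipPow]
  | succ d =>
      have hc : ((((d : Nat) + 1 : Nat) : Int)) ≠ 0 := by positivity
      have hm : PySem.Int.mod ((d + 1 : Nat) : Int) 2 = (((d + 1) % 2 : Nat) : Int) := by
        exact_mod_cast PySem.Int.mod_natCast (d + 1) 2
      rw [pvFlipPow_succ_eq]
      rcases Nat.even_or_odd d with h | h
      · have h0 : d % 2 = 0 := Nat.even_iff.mp h
        have h1 : (d + 1) % 2 = 1 := by omega
        simp only [h0, hm, h1]
        unfold pvFlip
        by_cases hv : v = 0 <;> simp [hv] <;> omega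
      · have h0 : d % 2 = 1 := Nat.odd_iff.mp h
        have h1 : (d + 1) % 2 = 0 := by omega
        simp only [h0, hm, h1]
        unfold pvFlip
        by_cases hv : v = 0 <;> simp [hv] <;> omega

lemma pvTf_zero (N : Int) (orig : List Int) : pvTf N 0 orig = orig := by
  unfold pvTf
  apply List.ext_getElem (by simp)
  intro k h1 h2
  simp [pvFlipPow]

lemma pvTf_length (N : Int) (c : Nat) (orig : List Int) : (pvTf N c orig).length = orig.length := by
  simp [pvTf]

-- A's inner fold from index b flips exactly the positions in [b, N)
lemma pvFlipAll_spec (N : Int) (m : Nat) : ∀ (b : Int), 0 ≤ b → (N - b).toNat = m →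
    ∀ st : List Int,
    ((PySem.List.pyRange b N 1).foldl
      (fun s j =>
        if PySem.List.pyGetD s j 0 == 0 then PySem.List.pySetD s j 1
        else PySem.List.pySetD s j 0) st)
    = st.mapIdx (fun k v => if b ≤ (k : Int) ∧ (k : Int) < N then pvFlip v else v) := by
  induction m with
  | zero =>
      intro b hb hm st
      have hNb : N ≤ b := by omega
      rw [PySem.List.pyRange_one_eq_nil hNb]
      simp only [List.foldl_nil]
      apply List.ext_getElem (by simp)
      intro k h1 h2
      have hc : ¬ (b ≤ (k : Int) ∧ (k : Int) < N) := by omega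
      rw [List.getElem_mapIdx, if_neg hc]
  | succ m ih =>
      intro b hb hm st
      have hbN : b < N := by omega
      rw [PySem.List.pyRange_one_cons hbN]
      simp only [List.foldl_cons]
      have hstep :
          (if PySem.List.pyGetD st b 0 == 0 then PySem.List.pySetD st b 1
           else PySem.List.pySetD st b 0)
          = st.set b.toNat (pvFlip (st.getD b.toNat 0)) := by
        by_cases hlt : b.toNat < st.length
        · have hread : PySem.List.pyGetD st b 0 = st[b.toNat] := by
            exact PySem.List.pyGetD_eq_getElem st 0 hb (by omega)
          rw [hread, PySem.List.pySetD_of_nonneg st 1 hb, PySem.List.pySetD_of_nonneg st 0 hb]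
          have hgd : st.getD b.toNat 0 = st[b.toNat] := List.getD_eq_getElem st 0 hlt
          rw [hgd]
          unfold pvFlip
          by_cases hv : st[b.toNat] = 0 <;> simp [hv]
        · have hlen : st.length ≤ b.toNat := by omega
          have hread : PySem.List.pyGetD st b 0 = 0 := by
            unfold PySem.List.pyGetD PySem.List.pyGet? PySem.List.pyIdx?
            have h2 : ¬ b < (st.length : Int) := by omega
            simp [hb, h2]
          rw [hread]
          simp only [beq_self_eq_true, if_true]
          rw [PySem.List.pySetD_of_nonneg st 1 hb, List.set_eq_of_length_le hlen,
              List.set_eq_of_length_le hlen]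
      rw [hstep, ih (b + 1) (by omega) (by omega)]
      apply List.ext_getElem (by simp)
      intro k h1 h2
      rw [List.getElem_mapIdx, List.getElem_mapIdx]
      have hlenk : k < st.length := by simpa using h2
      by_cases hk : k = b.toNat
      · subst hk
        rw [if_neg (by omega), if_pos (by omega), List.getElem_set_self,
            List.getD_eq_getElem st 0 hlenk]
      · rw [List.getElem_set_ne (by omega)]
        by_cases hc : b ≤ (k : Int) ∧ (k : Int) < N
        · rw [if_pos (by omega), if_pos hc]
        · rw [if_neg (by omega), if_neg hc]

-- one whole inner loop advances the flip count by one
lemma pvFlipAll_tf (N : Int) (c : Nat) (orig : List Int) :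
    retrieve_items_flipAll N (pvTf N c orig) = pvTf N (c + 1) orig := by
  unfold retrieve_items_flipAll
  rw [pvFlipAll_spec N (N - 0).toNat 0 le_rfl rfl]
  unfold pvTf
  rw [List.mapIdx_mapIdx]
  apply List.ext_getElem (by simp)
  intro k h1 h2
  simp only [List.getElem_mapIdx]
  by_cases hc : (k : Int) < N
  · have : (0 : Int) ≤ (k : Int) ∧ (k : Int) < N := ⟨by positivity, hc⟩
    simp [hc, this, pvFlipPow]
  · simp [hc]

-- reading position a of the flipped list
lemma pvTf_read (N : Int) (c : Nat) (orig : List Int) (a : Int)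
    (ha : 0 ≤ a) (haN : a < N) (hlen : a.toNat < orig.length) :
    PySem.List.pyGetD (pvTf N c orig) a 0 = pvFlipPow c (orig[a.toNat]) := by
  have hlen' : a < ((pvTf N c orig).length : Int) := by rw [pvTf_length]; omega
  rw [PySem.List.pyGetD_eq_getElem _ 0 ha hlen']
  have h2 : a.toNat < (pvTf N c orig).length := by rw [pvTf_length]; exact hlen
  unfold pvTf
  rw [List.getElem_mapIdx, if_pos (by omega : ((a.toNat : Int)) < N)]

-- the abstract per-element step A's outer loop performs, on the original value
def pvStep3 (count v : Int) : Int :=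
  let hot : Bool :=
    if count == 0 then v == 1
    else if PySem.Int.mod count 2 == 1 then v == 0
    else !(v == 0)
  if hot then count + 1 else count

-- B's fold step
def pvStep2 (count v : Int) : Int :=
  if (if PySem.Int.mod count 2 == 1 then v == 0 else !(v == 0)) then count + 1 else count

-- main loop correspondence: A's remaining outer loop from index a with count c
-- equals the abstract fold over the remaining original values with count c
lemma pvMain (orig : List Int) (N : Int) (hlen : N ≤ (orig.length : Int)) (m : Nat) :
    ∀ (a : Int), 0 ≤ a → (N - a).toNat = m → ∀ (c : Nat),
    ((PySem.List.pyRange a N 1).foldl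
      (fun (p : Int × List Int) i =>
        if PySem.List.pyGetD p.2 i 0 == 1 then (p.1 + 1, retrieve_items_flipAll N p.2)
        else p)
      ((c : Int), pvTf N c orig)).1
    = ((orig.take N.toNat).drop a.toNat).foldl pvStep3 (c : Int) := by
  induction m with
  | zero =>
      intro a ha hm c
      have hNa : N ≤ a := by omega
      rw [PySem.List.pyRange_one_eq_nil hNa]
      have : (orig.take N.toNat).length ≤ a.toNat := by
        simp only [List.length_take]
        omega
      rw [List.drop_eq_nil_of_le this]
      rfl
  | succ m ih =>
      intro a ha hm c
      have haN : a < N := by omega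
      have hidx : a.toNat < orig.length := by omega
      have hidx2 : a.toNat < (orig.take N.toNat).length := by
        simp only [List.length_take]; omega
      rw [PySem.List.pyRange_one_cons haN]
      simp only [List.foldl_cons]
      rw [List.drop_eq_getElem_cons hidx2, List.foldl_cons, List.getElem_take]
      rw [pvTf_read N c orig a ha haN hidx]
      rw [pvHot_eq c (orig[a.toNat])]
      set v := orig[a.toNat] with hv
      by_cases hhot : (if ((c : Int)) == 0 then v == 1
        else if PySem.Int.mod (c : Int) 2 == 1 then v == 0 else !(v == 0)) = true
      · rw [if_pos hhot]
        have hstep : pvStep3 (c : Int) v = (c : Int) + 1 := by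
          simp only [pvStep3]
          rw [if_pos hhot]
        rw [hstep]
        rw [pvFlipAll_tf N c orig]
        have hc1 : ((c : Int)) + 1 = (((c + 1 : Nat)) : Int) := by push_cast; ring
        rw [hc1]
        have := ih (a + 1) (by omega) (by omega) (c + 1)
        rw [show (a + 1).toNat = a.toNat + 1 by omega] at this
        exact this
      · rw [if_neg hhot]
        have hstep : pvStep3 (c : Int) v = (c : Int) := by
          simp only [pvStep3]
          rw [if_neg hhot]
        rw [hstep]
        have := ih (a + 1) (by omega) (by omega) c
        rw [show (a + 1).toNat = a.toNat + 1 by omega] at this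
        exact this

-- once at least one flip has happened, the three-way step is B's two-way step
lemma pvStep3_eq_step2 (L : List Int) : ∀ (c : Int), 1 ≤ c →
    L.foldl pvStep3 c = L.foldl pvStep2 c := by
  induction L with
  | nil => intro c _; rfl
  | cons v L ih =>
      intro c hc
      have hc0 : (c == 0) = false := by simp; omega
      have hstep : pvStep3 c v = pvStep2 c v := by
        simp only [pvStep3, pvStep2, hc0, Bool.false_eq_true, if_false]
      simp only [List.foldl_cons, hstep]
      have hnext : 1 ≤ pvStep2 c v := by
        unfold pvStep2; split_ifs <;> omega
      exact ih (pvStep2 c v) hnext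

-- B from index i equals the abstract fold over the remaining original values with count 0
lemma pvBMain (orig : List Int) (N : Int) (hlen : N ≤ (orig.length : Int)) (m : Nat) :
    ∀ (i : Int), 0 ≤ i → (N - i).toNat = m →
    (let j := retrieve_items_find orig N i;
     if N ≤ j then 0 else
       (PySem.List.slice orig (some (j + 1)) (some N)).foldl pvStep2 1)
    = ((orig.take N.toNat).drop i.toNat).foldl pvStep3 0 := by
  induction m with
  | zero =>
      intro i hi hm
      have hNi : N ≤ i := by omega
      rw [retrieve_items_find, dif_neg (by omega : ¬ i < N)]
      simp only [hNi, if_pos]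
      have : (orig.take N.toNat).length ≤ i.toNat := by
        simp only [List.length_take]; omega
      rw [List.drop_eq_nil_of_le this]
      rfl
  | succ m ih =>
      intro i hi hm
      have hiN : i < N := by omega
      have hidx : i.toNat < orig.length := by omega
      have hidx2 : i.toNat < (orig.take N.toNat).length := by
        simp only [List.length_take]; omega
      have hread : PySem.List.pyGetD orig i 0 = orig[i.toNat] :=
        PySem.List.pyGetD_eq_getElem orig 0 hi (by omega)
      rw [List.drop_eq_getElem_cons hidx2, List.foldl_cons, List.getElem_take]
      rw [retrieve_items_find, dif_pos hiN, hread]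
      set v := orig[i.toNat] with hv
      by_cases h1 : (v == 1) = true
      · simp only [h1, if_pos]
        rw [if_neg (by omega : ¬ N ≤ i)]
        have hstep : pvStep3 0 v = 1 := by
          simp only [pvStep3]
          simp [h1]
        rw [hstep]
        have hslice : PySem.List.slice orig (some (i + 1)) (some N)
            = (orig.take N.toNat).drop (i.toNat + 1) := by
          rw [PySem.List.slice_toNat orig (by omega : (0:Int) ≤ i + 1) (by omega : (0:Int) ≤ N)]
          rw [show (i + 1).toNat = i.toNat + 1 from by omega]
          rw [List.drop_take]
        rw [hslice]
        exact (pvStep3_eq_step2 _ 1 le_rfl).symm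
      · simp only [h1, Bool.false_eq_true, if_false]
        have hstep : pvStep3 0 v = 0 := by
          simp only [pvStep3]
          simp [h1]
        rw [hstep]
        have := ih (i + 1) (by omega) (by omega)
        rw [show (i + 1).toNat = i.toNat + 1 by omega] at this
        exact this

-- ===== VERDICT (by name: the statement is the Claim_ definition above) =====
theorem retrieve_items_spec : Claim_equal_retrieve_items := by
  intro N states _ hpre
  unfold Spec_retrieve_items retrieve_items retrieve_items_alt
  have hA := pvMain states N hpre (N - 0).toNat 0 le_rfl rfl 0
  rw [pvTf_zero] at hA
  simp only [Nat.cast_zero, List.drop_zero, Int.toNat_zero] at hA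
  have hB := pvBMain states N hpre (N - 0).toNat 0 le_rfl rfl
  simp only [Int.toNat_zero, List.drop_zero] at hB
  rw [hA]
  exact hB.symm
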